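-- pv_equiv track=rewrite | github.com/Shilenkovv/Algorithms_PyGen_bg | 6_search_algorithms/6_2_6.py | lowercase_before_uppercase
-- ===== SOURCE A (Python) =====
-- def lowercase_before_uppercase(s: str) -> bool:
--     """
--     Checks if all lowercase letters in the string appear before any uppercase letters.
--
--     Args:
--         s (str): The input string to check, where 1 <= len(s) <= 10^5.
--
--     Returns:
--         bool: True if all lowercase letters precede uppercase letters; False otherwise.
--     """
--     now_upper = False
--     for char in s:
--         if char.islower():
--             if now_upper:
--                 return False
--         elif char.isupper():
--             now_upper = True
--     return True
-- ===== SOURCE B (Python) =====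
-- def lowercase_before_uppercase(s: str) -> bool:
--     last_lower = max((i for i, c in enumerate(s) if c.islower()), default=-1)
--     first_upper = min((i for i, c in enumerate(s) if c.isupper()), default=len(s))
--     return last_lower < first_upper
-- ===== Notes on version B (the rewrite author's own statement) =====
-- stated objective: simpler
-- what changed: Replaces the early-exit flag state machine by comparing the last index of a lowercase letter with the first index of an uppercase letter (with defaults -1/len(s) when absent).
import Mathlib
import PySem

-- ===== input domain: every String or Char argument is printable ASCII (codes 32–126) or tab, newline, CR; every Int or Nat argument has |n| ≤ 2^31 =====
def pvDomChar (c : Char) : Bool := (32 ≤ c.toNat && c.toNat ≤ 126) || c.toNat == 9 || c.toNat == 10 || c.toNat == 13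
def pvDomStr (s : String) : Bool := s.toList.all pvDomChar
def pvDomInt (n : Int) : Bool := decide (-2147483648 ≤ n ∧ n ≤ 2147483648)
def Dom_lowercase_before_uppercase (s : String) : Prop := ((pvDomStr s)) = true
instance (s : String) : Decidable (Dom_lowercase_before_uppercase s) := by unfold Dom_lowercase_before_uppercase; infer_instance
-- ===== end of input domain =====

-- B replaces A's early-exit flag state machine by comparing the last lowercase index
-- with the first uppercase index (objective: simpler).

-- ===== PORT A =====
-- the for-loop with the `now_upper` flag and the early `return False`
def pvGoA : List Char → Bool → Bool
  | [], _ => true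
  | c :: cs, nowUpper =>
    if PySem.Chars.islower c then
      if nowUpper then false else pvGoA cs nowUpper
    else if PySem.Chars.isupper c then pvGoA cs true
    else pvGoA cs nowUpper

def lowercase_before_uppercase (s : String) : Bool := pvGoA s.toList false

-- ===== PORT B =====
def lowercase_before_uppercase_alt (s : String) : Bool :=
  let cs := s.toList
  -- max((i for i, c in enumerate(s) if c.islower()), default=-1)
  let lastLower : Int := (PySem.List.enumerate cs).foldl
    (fun a p => if PySem.Chars.islower p.2 then max a p.1 else a) (-1)
  -- min((i for i, c in enumerate(s) if c.isupper()), default=len(s))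
  let firstUpper : Int := (PySem.List.enumerate cs).foldl
    (fun a p => if PySem.Chars.isupper p.2 then min a p.1 else a) (cs.length : Int)
  decide (lastLower < firstUpper)

-- ===== PRECONDITION & SPEC =====
def Spec_lowercase_before_uppercase (s : String) (out : Bool) : Prop := out = lowercase_before_uppercase_alt s
instance (s : String) (out : Bool) : Decidable (Spec_lowercase_before_uppercase s out) := by unfold Spec_lowercase_before_uppercase; infer_instance

-- ===== CLAIM (what is proved, stated in full; the proofs are below) =====
def Claim_equal_lowercase_before_uppercase : Prop := ∀ (s : String), Dom_lowercase_before_uppercase s → Spec_lowercase_before_uppercase s (lowercase_before_uppercase s)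

-- ===== LEMMAS AND PROOFS =====
def pvFi : List Char → Nat
  | [] => 0
  | c :: cs => if PySem.Chars.isupper c then 0 else 1 + pvFi cs

def pvLi : List Char → Nat
  | [] => 0
  | _ :: cs => if cs.any PySem.Chars.islower then 1 + pvLi cs else 0

theorem pvLower_not_upper (c : Char) (h : PySem.Chars.islower c = true) :
    PySem.Chars.isupper c = false := by
  simp only [PySem.Chars.islower, PySem.Chars.isupper, Bool.and_eq_true, decide_eq_true_eq] at *
  simp only [Bool.and_eq_false_iff, decide_eq_false_iff_not]
  right
  intro hle
  exact absurd (le_trans h.1 hle) (by decide)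

theorem pvFi_le (cs : List Char) : pvFi cs ≤ cs.length := by
  induction cs with
  | nil => simp [pvFi]
  | cons c cs ih => simp only [pvFi, List.length_cons]; split <;> omega

theorem pvFoldFU (cs : List Char) (k m : Int) :
    (PySem.List.enumerate cs k).foldl
      (fun a p => if PySem.Chars.isupper p.2 then min a p.1 else a) m
    = if cs.any PySem.Chars.isupper then min m (k + pvFi cs) else m := by
  induction cs generalizing k m with
  | nil => simp [PySem.List.enumerate_nil]
  | cons c cs ih =>
    rw [PySem.List.enumerate_cons]
    simp only [List.foldl_cons, List.any_cons, pvFi]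
    by_cases hu : PySem.Chars.isupper c = true
    · rw [if_pos hu, ih]
      simp only [hu, Bool.true_or, if_true]
      split <;> omega
    · rw [if_neg hu, ih]
      simp only [hu, Bool.false_or, Bool.false_eq_true, if_false]
      split <;> [skip; rfl]
      push_cast; omega

theorem pvFoldLL (cs : List Char) (k a : Int) :
    (PySem.List.enumerate cs k).foldl
      (fun a p => if PySem.Chars.islower p.2 then max a p.1 else a) a
    = if cs.any PySem.Chars.islower then max a (k + pvLi cs) else a := by
  induction cs generalizing k a with
  | nil => simp [PySem.List.enumerate_nil]
  | cons c cs ih =>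
    rw [PySem.List.enumerate_cons]
    simp only [List.foldl_cons, List.any_cons, pvLi]
    by_cases hl : PySem.Chars.islower c = true
    · rw [if_pos hl, ih]
      simp only [hl, Bool.true_or, if_true]
      split <;> push_cast <;> omega
    · rw [if_neg hl, ih]
      simp only [hl, Bool.false_or, Bool.false_eq_true, if_false]
      split <;> [push_cast; rfl]
      omega

theorem pvGoA_no_lower (cs : List Char) (b : Bool)
    (h : cs.any PySem.Chars.islower = false) : pvGoA cs b = true := by
  induction cs generalizing b with
  | nil => rfl
  | cons c cs ih =>
    simp only [List.any_cons, Bool.or_eq_false_iff] at h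
    rw [pvGoA, if_neg (by simp [h.1])]
    split <;> exact ih _ h.2

theorem pvGoA_true_false (cs : List Char)
    (h : cs.any PySem.Chars.islower = true) : pvGoA cs true = false := by
  induction cs with
  | nil => simp at h
  | cons c cs ih =>
    by_cases hl : PySem.Chars.islower c = true
    · simp [pvGoA, hl]
    · simp only [List.any_cons, hl, Bool.false_or] at h
      rw [pvGoA, if_neg (by simp [hl])]
      split <;> exact ih h

theorem pvGoA_no_upper (cs : List Char)
    (h : cs.any PySem.Chars.isupper = false) : pvGoA cs false = true := by
  induction cs with
  | nil => rfl
  | cons c cs ih =>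
    simp only [List.any_cons, Bool.or_eq_false_iff] at h
    by_cases hl : PySem.Chars.islower c = true
    · rw [pvGoA, if_pos hl, if_neg (by simp)]
      exact ih h.2
    · rw [pvGoA, if_neg (by simp [hl]), if_neg (by simp [h.1])]
      exact ih h.2

theorem pvGoA_main (cs : List Char)
    (hl : cs.any PySem.Chars.islower = true) (hu : cs.any PySem.Chars.isupper = true) :
    pvGoA cs false = decide (pvLi cs < pvFi cs) := by
  induction cs with
  | nil => simp at hl
  | cons c cs ih =>
    by_cases hlc : PySem.Chars.islower c = true
    · have huc := pvLower_not_upper c hlc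
      simp only [List.any_cons, huc, Bool.false_or, Bool.false_eq_true] at hu
      rw [pvGoA, if_pos hlc, if_neg (by simp)]
      simp only [pvLi, pvFi, huc, Bool.false_eq_true, if_false]
      by_cases h : cs.any PySem.Chars.islower = true
      · rw [ih h hu, h, if_pos rfl]
        by_cases hd : pvLi cs < pvFi cs <;> simp [hd]
      · rw [pvGoA_no_lower cs false (by simpa using h)]
        rw [eq_false_of_ne_true h, if_neg (by simp)]
        simp
    · by_cases huc : PySem.Chars.isupper c = true
      · have hcs : cs.any PySem.Chars.islower = true := by
          simpa [hlc] using hl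
        rw [pvGoA, if_neg (by simp [hlc]), if_pos huc, pvGoA_true_false cs hcs]
        simp [pvLi, pvFi, huc, hcs]
      · have hl' : cs.any PySem.Chars.islower = true := by simpa [hlc] using hl
        have hu' : cs.any PySem.Chars.isupper = true := by simpa [huc] using hu
        rw [pvGoA, if_neg (by simp [hlc]), if_neg (by simp [huc]), ih hl' hu']
        simp only [pvLi, pvFi, hl', huc, Bool.false_eq_true, if_true, if_false]
        by_cases hd : pvLi cs < pvFi cs <;> simp [hd]

theorem pvLi_lt (cs : List Char) (h : cs.any PySem.Chars.islower = true) :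
    pvLi cs < cs.length := by
  induction cs with
  | nil => simp at h
  | cons c cs ih =>
    simp only [pvLi, List.length_cons]
    split
    · rename_i hh; have := ih hh; omega
    · omega

-- ===== VERDICT (by name: the statement is the Claim_ definition above) =====
theorem lowercase_before_uppercase_spec : Claim_equal_lowercase_before_uppercase := by
  intro s _
  unfold Spec_lowercase_before_uppercase lowercase_before_uppercase lowercase_before_uppercase_alt
  simp only [pvFoldFU, pvFoldLL]
  have hlen : s.toList.length = s.length := by simp
  by_cases hl : s.toList.any PySem.Chars.islower = true
  · by_cases hu : s.toList.any PySem.Chars.isupper = true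
    · rw [pvGoA_main _ hl hu]
      simp only [hl, hu, if_true]
      have h1 := pvFi_le s.toList
      by_cases hd : pvLi s.toList < pvFi s.toList <;> simp [hd] <;> omega
    · rw [pvGoA_no_upper _ (by simpa using hu)]
      simp only [hl, if_neg hu, if_true]
      have := pvLi_lt s.toList hl
      simp; omega
  · rw [pvGoA_no_lower _ _ (by simpa using hl)]
    simp only [if_neg hl]
    by_cases hu : s.toList.any PySem.Chars.isupper = true
    · simp only [hu, if_true]
      have h1 := pvFi_le s.toList
      simp; omega
    · simp only [if_neg hu]
      have : (0:Int) ≤ s.length := Int.natCast_nonneg _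
      simp; omega
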